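-- pv_equiv track=rewrite | github.com/marelhott/StreamVault | resources/lib/services/player.py | _is_same_language
-- ===== SOURCE A (Python) =====
-- def _is_same_language(lang1, lang2):
--     """Porovná dva jazykové kódy (napr. 'cz' vs 'ces' vs 'cze')"""
--     # Normalizuj jazyky na lowercase
--     l1 = lang1.lower().strip()
--     l2 = lang2.lower().strip()
--
--     # Priame porovnanie
--     if l1 == l2:
--         return True
--
--     # Mapy variant jazyka
--     lang_map = {
--         'sk': ['sk', 'slo', 'slk', 'slovak'],
--         'cz': ['cz', 'ces', 'cze', 'czech'],
--         'en': ['en', 'eng', 'english'],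
--         'hu': ['hu', 'hun', 'hungarian'],
--         'de': ['de', 'deu', 'ger', 'german'],
--     }
--
--     # Skontroluj či oba patria do rovnakej skupiny
--     for variants in lang_map.values():
--         if l1 in variants and l2 in variants:
--             return True
--
--     return False
-- ===== SOURCE B (Python) =====
-- # Inverted index: precompute code -> canonical group key once; per call just two dict lookups.
-- _LANG_GROUPS = {
--     'sk': ['sk', 'slo', 'slk', 'slovak'],
--     'cz': ['cz', 'ces', 'cze', 'czech'],
--     'en': ['en', 'eng', 'english'],
--     'hu': ['hu', 'hun', 'hungarian'],
--     'de': ['de', 'deu', 'ger', 'german'],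
-- }
-- _CODE_TO_GROUP = {code: key for key, variants in _LANG_GROUPS.items() for code in variants}
--
--
-- def _is_same_language(lang1, lang2):
--     """Porovná dva jazykové kódy (napr. 'cz' vs 'ces' vs 'cze')"""
--     l1 = lang1.lower().strip()
--     l2 = lang2.lower().strip()
--     if l1 == l2:
--         return True
--     g1 = _CODE_TO_GROUP.get(l1)
--     g2 = _CODE_TO_GROUP.get(l2)
--     return g1 is not None and g1 == g2
-- ===== Notes on version B (the rewrite author's own statement) =====
-- stated objective: idiomatic
-- what changed: Replaces the per-call loop over the five variant lists by an inverted dictionary (code -> canonical group key) precomputed once at module load, so each call does two constant-time lookups and compares the group keys.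
import Mathlib
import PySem

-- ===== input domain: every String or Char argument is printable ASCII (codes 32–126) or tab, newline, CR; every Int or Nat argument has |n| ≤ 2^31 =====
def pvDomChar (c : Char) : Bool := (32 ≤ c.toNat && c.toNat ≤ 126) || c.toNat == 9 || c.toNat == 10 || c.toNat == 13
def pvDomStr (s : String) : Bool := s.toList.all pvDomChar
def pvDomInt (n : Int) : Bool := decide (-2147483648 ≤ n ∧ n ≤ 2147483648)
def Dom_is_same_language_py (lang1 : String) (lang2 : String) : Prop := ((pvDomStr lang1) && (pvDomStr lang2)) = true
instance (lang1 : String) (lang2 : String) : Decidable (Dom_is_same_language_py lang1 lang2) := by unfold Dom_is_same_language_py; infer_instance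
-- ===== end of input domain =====

-- B replaces A's per-call scan over the five variant lists by a precomputed inverted
-- index (code → canonical group key) and two constant-time lookups (objective: idiomatic).

-- ===== PORT A =====
def is_same_language_py (lang1 : String) (lang2 : String) : Bool :=
  let l1 := PySem.Str.strip (PySem.Str.lower lang1)
  let l2 := PySem.Str.strip (PySem.Str.lower lang2)
  if l1 == l2 then true
  else
    let lang_map : PySem.Dict String (List String) := PySem.Dict.ofList
      [ ("sk", ["sk", "slo", "slk", "slovak"])
      , ("cz", ["cz", "ces", "cze", "czech"])
      , ("en", ["en", "eng", "english"])
      , ("hu", ["hu", "hun", "hungarian"])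
      , ("de", ["de", "deu", "ger", "german"]) ]
    -- 'for variants in lang_map.values(): if l1 in variants and l2 in variants: return True'
    (lang_map.values).any (fun variants => variants.contains l1 && variants.contains l2)

-- ===== PORT B =====
-- the inverted index _CODE_TO_GROUP, built once from the same group data
def codeToGroup : PySem.Dict String String := PySem.Dict.ofList
  [ ("sk", "sk"), ("slo", "sk"), ("slk", "sk"), ("slovak", "sk")
  , ("cz", "cz"), ("ces", "cz"), ("cze", "cz"), ("czech", "cz")
  , ("en", "en"), ("eng", "en"), ("english", "en")
  , ("hu", "hu"), ("hun", "hu"), ("hungarian", "hu")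
  , ("de", "de"), ("deu", "de"), ("ger", "de"), ("german", "de") ]

def is_same_language_py_alt (lang1 : String) (lang2 : String) : Bool :=
  let l1 := PySem.Str.strip (PySem.Str.lower lang1)
  let l2 := PySem.Str.strip (PySem.Str.lower lang2)
  if l1 == l2 then true
  else
    -- 'g1 is not None and g1 == g2' (None == a string is False in Python)
    let g1 := codeToGroup.get? l1
    let g2 := codeToGroup.get? l2
    g1.isSome && g1 == g2

-- ===== PRECONDITION & SPEC =====
def Spec_is_same_language_py (lang1 : String) (lang2 : String) (out : Bool) : Prop := out = is_same_language_py_alt lang1 lang2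
instance (lang1 : String) (lang2 : String) (out : Bool) : Decidable (Spec_is_same_language_py lang1 lang2 out) := by unfold Spec_is_same_language_py; infer_instance

-- ===== CLAIM (what is proved, stated in full; the proofs are below) =====
def Claim_equal_is_same_language_py : Prop := ∀ (lang1 : String) (lang2 : String), Dom_is_same_language_py lang1 lang2 → Spec_is_same_language_py lang1 lang2 (is_same_language_py lang1 lang2)

-- ===== LEMMAS AND PROOFS =====

-- index of a normalized code in the fixed list of 18 known variant codes (18 = unknown)
def idxOf (s : String) : Fin 19 :=
  if s = "sk" then 0 else if s = "slo" then 1 else if s = "slk" then 2 else if s = "slovak" then 3 else if s = "cz" then 4 else if s = "ces" then 5 else if s = "cze" then 6 else if s = "czech" then 7 else if s = "en" then 8 else if s = "eng" then 9 else if s = "english" then 10 else if s = "hu" then 11 else if s = "hun" then 12 else if s = "hungarian" then 13 else if s = "de" then 14 else if s = "deu" then 15 else if s = "ger" then 16 else if s = "german" then 17 else 18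

-- keyTab i = the canonical group key of code number i (none for 18 = unknown)
def keyTab (i : Fin 19) : Option String :=
  [some "sk", some "sk", some "sk", some "sk",
   some "cz", some "cz", some "cz", some "cz",
   some "en", some "en", some "en",
   some "hu", some "hu", some "hu",
   some "de", some "de", some "de", some "de"].getD i.val none

-- memTab_sk i = whether code number i lies in the 'sk' variant list
def memTab_sk (i : Fin 19) : Bool :=
  [true, true, true, true, false, false, false, false, false, false, false, false, false, false, false, false, false, false, false].getD i.val false

-- memTab_cz i = whether code number i lies in the 'cz' variant list
def memTab_cz (i : Fin 19) : Bool :=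
  [false, false, false, false, true, true, true, true, false, false, false, false, false, false, false, false, false, false, false].getD i.val false

-- memTab_en i = whether code number i lies in the 'en' variant list
def memTab_en (i : Fin 19) : Bool :=
  [false, false, false, false, false, false, false, false, true, true, true, false, false, false, false, false, false, false, false].getD i.val false

-- memTab_hu i = whether code number i lies in the 'hu' variant list
def memTab_hu (i : Fin 19) : Bool :=
  [false, false, false, false, false, false, false, false, false, false, false, true, true, true, false, false, false, false, false].getD i.val false

-- memTab_de i = whether code number i lies in the 'de' variant list
def memTab_de (i : Fin 19) : Bool :=
  [false, false, false, false, false, false, false, false, false, false, false, false, false, false, true, true, true, true, false].getD i.val false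

lemma codeToGroup_eq : codeToGroup = PySem.Dict.mk
  [ ("sk", "sk"), ("slo", "sk"), ("slk", "sk"), ("slovak", "sk")
  , ("cz", "cz"), ("ces", "cz"), ("cze", "cz"), ("czech", "cz")
  , ("en", "en"), ("eng", "en"), ("english", "en")
  , ("hu", "hu"), ("hun", "hu"), ("hungarian", "hu")
  , ("de", "de"), ("deu", "de"), ("ger", "de"), ("german", "de") ] := rfl

lemma get?_codeToGroup (s : String) : codeToGroup.get? s = keyTab (idxOf s) := by
  unfold idxOf
  by_cases h1 : s = "sk"
  · subst h1; decide
  by_cases h2 : s = "slo"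
  · subst h2; decide
  by_cases h3 : s = "slk"
  · subst h3; decide
  by_cases h4 : s = "slovak"
  · subst h4; decide
  by_cases h5 : s = "cz"
  · subst h5; decide
  by_cases h6 : s = "ces"
  · subst h6; decide
  by_cases h7 : s = "cze"
  · subst h7; decide
  by_cases h8 : s = "czech"
  · subst h8; decide
  by_cases h9 : s = "en"
  · subst h9; decide
  by_cases h10 : s = "eng"
  · subst h10; decide
  by_cases h11 : s = "english"
  · subst h11; decide
  by_cases h12 : s = "hu"
  · subst h12; decide
  by_cases h13 : s = "hun"
  · subst h13; decide
  by_cases h14 : s = "hungarian"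
  · subst h14; decide
  by_cases h15 : s = "de"
  · subst h15; decide
  by_cases h16 : s = "deu"
  · subst h16; decide
  by_cases h17 : s = "ger"
  · subst h17; decide
  by_cases h18 : s = "german"
  · subst h18; decide
  rw [if_neg h1, if_neg h2, if_neg h3, if_neg h4, if_neg h5, if_neg h6, if_neg h7, if_neg h8, if_neg h9, if_neg h10, if_neg h11, if_neg h12, if_neg h13, if_neg h14, if_neg h15, if_neg h16, if_neg h17, if_neg h18]
  simp [codeToGroup_eq, PySem.Dict.get?, keyTab, beq_iff_eq, Ne.symm h1, Ne.symm h2, Ne.symm h3, Ne.symm h4, Ne.symm h5, Ne.symm h6, Ne.symm h7, Ne.symm h8, Ne.symm h9, Ne.symm h10, Ne.symm h11, Ne.symm h12, Ne.symm h13, Ne.symm h14, Ne.symm h15, Ne.symm h16, Ne.symm h17, Ne.symm h18]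

lemma contains_group_sk (s : String) :
    (["sk", "slo", "slk", "slovak"].contains s) = memTab_sk (idxOf s) := by
  unfold idxOf
  by_cases h1 : s = "sk"
  · subst h1; decide
  by_cases h2 : s = "slo"
  · subst h2; decide
  by_cases h3 : s = "slk"
  · subst h3; decide
  by_cases h4 : s = "slovak"
  · subst h4; decide
  by_cases h5 : s = "cz"
  · subst h5; decide
  by_cases h6 : s = "ces"
  · subst h6; decide
  by_cases h7 : s = "cze"
  · subst h7; decide
  by_cases h8 : s = "czech"
  · subst h8; decide
  by_cases h9 : s = "en"
  · subst h9; decide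
  by_cases h10 : s = "eng"
  · subst h10; decide
  by_cases h11 : s = "english"
  · subst h11; decide
  by_cases h12 : s = "hu"
  · subst h12; decide
  by_cases h13 : s = "hun"
  · subst h13; decide
  by_cases h14 : s = "hungarian"
  · subst h14; decide
  by_cases h15 : s = "de"
  · subst h15; decide
  by_cases h16 : s = "deu"
  · subst h16; decide
  by_cases h17 : s = "ger"
  · subst h17; decide
  by_cases h18 : s = "german"
  · subst h18; decide
  rw [if_neg h1, if_neg h2, if_neg h3, if_neg h4, if_neg h5, if_neg h6, if_neg h7, if_neg h8, if_neg h9, if_neg h10, if_neg h11, if_neg h12, if_neg h13, if_neg h14, if_neg h15, if_neg h16, if_neg h17, if_neg h18]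
  simp [memTab_sk, h1, h2, h3, h4]

lemma contains_group_cz (s : String) :
    (["cz", "ces", "cze", "czech"].contains s) = memTab_cz (idxOf s) := by
  unfold idxOf
  by_cases h1 : s = "sk"
  · subst h1; decide
  by_cases h2 : s = "slo"
  · subst h2; decide
  by_cases h3 : s = "slk"
  · subst h3; decide
  by_cases h4 : s = "slovak"
  · subst h4; decide
  by_cases h5 : s = "cz"
  · subst h5; decide
  by_cases h6 : s = "ces"
  · subst h6; decide
  by_cases h7 : s = "cze"
  · subst h7; decide
  by_cases h8 : s = "czech"
  · subst h8; decide
  by_cases h9 : s = "en"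
  · subst h9; decide
  by_cases h10 : s = "eng"
  · subst h10; decide
  by_cases h11 : s = "english"
  · subst h11; decide
  by_cases h12 : s = "hu"
  · subst h12; decide
  by_cases h13 : s = "hun"
  · subst h13; decide
  by_cases h14 : s = "hungarian"
  · subst h14; decide
  by_cases h15 : s = "de"
  · subst h15; decide
  by_cases h16 : s = "deu"
  · subst h16; decide
  by_cases h17 : s = "ger"
  · subst h17; decide
  by_cases h18 : s = "german"
  · subst h18; decide
  rw [if_neg h1, if_neg h2, if_neg h3, if_neg h4, if_neg h5, if_neg h6, if_neg h7, if_neg h8, if_neg h9, if_neg h10, if_neg h11, if_neg h12, if_neg h13, if_neg h14, if_neg h15, if_neg h16, if_neg h17, if_neg h18]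
  simp [memTab_cz, h5, h6, h7, h8]

lemma contains_group_en (s : String) :
    (["en", "eng", "english"].contains s) = memTab_en (idxOf s) := by
  unfold idxOf
  by_cases h1 : s = "sk"
  · subst h1; decide
  by_cases h2 : s = "slo"
  · subst h2; decide
  by_cases h3 : s = "slk"
  · subst h3; decide
  by_cases h4 : s = "slovak"
  · subst h4; decide
  by_cases h5 : s = "cz"
  · subst h5; decide
  by_cases h6 : s = "ces"
  · subst h6; decide
  by_cases h7 : s = "cze"
  · subst h7; decide
  by_cases h8 : s = "czech"
  · subst h8; decide
  by_cases h9 : s = "en"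
  · subst h9; decide
  by_cases h10 : s = "eng"
  · subst h10; decide
  by_cases h11 : s = "english"
  · subst h11; decide
  by_cases h12 : s = "hu"
  · subst h12; decide
  by_cases h13 : s = "hun"
  · subst h13; decide
  by_cases h14 : s = "hungarian"
  · subst h14; decide
  by_cases h15 : s = "de"
  · subst h15; decide
  by_cases h16 : s = "deu"
  · subst h16; decide
  by_cases h17 : s = "ger"
  · subst h17; decide
  by_cases h18 : s = "german"
  · subst h18; decide
  rw [if_neg h1, if_neg h2, if_neg h3, if_neg h4, if_neg h5, if_neg h6, if_neg h7, if_neg h8, if_neg h9, if_neg h10, if_neg h11, if_neg h12, if_neg h13, if_neg h14, if_neg h15, if_neg h16, if_neg h17, if_neg h18]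
  simp [memTab_en, h9, h10, h11]

lemma contains_group_hu (s : String) :
    (["hu", "hun", "hungarian"].contains s) = memTab_hu (idxOf s) := by
  unfold idxOf
  by_cases h1 : s = "sk"
  · subst h1; decide
  by_cases h2 : s = "slo"
  · subst h2; decide
  by_cases h3 : s = "slk"
  · subst h3; decide
  by_cases h4 : s = "slovak"
  · subst h4; decide
  by_cases h5 : s = "cz"
  · subst h5; decide
  by_cases h6 : s = "ces"
  · subst h6; decide
  by_cases h7 : s = "cze"
  · subst h7; decide
  by_cases h8 : s = "czech"
  · subst h8; decide
  by_cases h9 : s = "en"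
  · subst h9; decide
  by_cases h10 : s = "eng"
  · subst h10; decide
  by_cases h11 : s = "english"
  · subst h11; decide
  by_cases h12 : s = "hu"
  · subst h12; decide
  by_cases h13 : s = "hun"
  · subst h13; decide
  by_cases h14 : s = "hungarian"
  · subst h14; decide
  by_cases h15 : s = "de"
  · subst h15; decide
  by_cases h16 : s = "deu"
  · subst h16; decide
  by_cases h17 : s = "ger"
  · subst h17; decide
  by_cases h18 : s = "german"
  · subst h18; decide
  rw [if_neg h1, if_neg h2, if_neg h3, if_neg h4, if_neg h5, if_neg h6, if_neg h7, if_neg h8, if_neg h9, if_neg h10, if_neg h11, if_neg h12, if_neg h13, if_neg h14, if_neg h15, if_neg h16, if_neg h17, if_neg h18]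
  simp [memTab_hu, h12, h13, h14]

lemma contains_group_de (s : String) :
    (["de", "deu", "ger", "german"].contains s) = memTab_de (idxOf s) := by
  unfold idxOf
  by_cases h1 : s = "sk"
  · subst h1; decide
  by_cases h2 : s = "slo"
  · subst h2; decide
  by_cases h3 : s = "slk"
  · subst h3; decide
  by_cases h4 : s = "slovak"
  · subst h4; decide
  by_cases h5 : s = "cz"
  · subst h5; decide
  by_cases h6 : s = "ces"
  · subst h6; decide
  by_cases h7 : s = "cze"
  · subst h7; decide
  by_cases h8 : s = "czech"
  · subst h8; decide
  by_cases h9 : s = "en"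
  · subst h9; decide
  by_cases h10 : s = "eng"
  · subst h10; decide
  by_cases h11 : s = "english"
  · subst h11; decide
  by_cases h12 : s = "hu"
  · subst h12; decide
  by_cases h13 : s = "hun"
  · subst h13; decide
  by_cases h14 : s = "hungarian"
  · subst h14; decide
  by_cases h15 : s = "de"
  · subst h15; decide
  by_cases h16 : s = "deu"
  · subst h16; decide
  by_cases h17 : s = "ger"
  · subst h17; decide
  by_cases h18 : s = "german"
  · subst h18; decide
  rw [if_neg h1, if_neg h2, if_neg h3, if_neg h4, if_neg h5, if_neg h6, if_neg h7, if_neg h8, if_neg h9, if_neg h10, if_neg h11, if_neg h12, if_neg h13, if_neg h14, if_neg h15, if_neg h16, if_neg h17, if_neg h18]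
  simp [memTab_de, h15, h16, h17, h18]

lemma tab_equiv : ∀ i j : Fin 19,
    ((memTab_sk i && memTab_sk j) || ((memTab_cz i && memTab_cz j) ||
     ((memTab_en i && memTab_en j) || ((memTab_hu i && memTab_hu j) ||
     (memTab_de i && memTab_de j)))))
    = ((keyTab i).isSome && keyTab i == keyTab j) := by decide

-- ===== VERDICT (by name: the statement is the Claim_ definition above) =====
theorem is_same_language_py_spec : Claim_equal_is_same_language_py := by
  intro lang1 lang2 _
  unfold Spec_is_same_language_py is_same_language_py is_same_language_py_alt
  set l1 := PySem.Str.strip (PySem.Str.lower lang1) with hl1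
  set l2 := PySem.Str.strip (PySem.Str.lower lang2) with hl2
  by_cases h : l1 == l2
  · simp [h]
  · simp only [h, Bool.false_eq_true, not_false_eq_true, if_neg]
    rw [show (PySem.Dict.ofList
      [ ("sk", ["sk", "slo", "slk", "slovak"])
      , ("cz", ["cz", "ces", "cze", "czech"])
      , ("en", ["en", "eng", "english"])
      , ("hu", ["hu", "hun", "hungarian"])
      , ("de", ["de", "deu", "ger", "german"]) ]).values =
      [["sk", "slo", "slk", "slovak"], ["cz", "ces", "cze", "czech"],
       ["en", "eng", "english"], ["hu", "hun", "hungarian"],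
       ["de", "deu", "ger", "german"]] from rfl]
    simp only [List.any_cons, List.any_nil, Bool.or_false]
    rw [contains_group_sk l1, contains_group_sk l2, contains_group_cz l1, contains_group_cz l2,
        contains_group_en l1, contains_group_en l2, contains_group_hu l1, contains_group_hu l2,
        contains_group_de l1, contains_group_de l2,
        get?_codeToGroup l1, get?_codeToGroup l2]
    exact tab_equiv (idxOf l1) (idxOf l2)
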